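-- pv_equiv track=rewrite | github.com/alwaysbegrowing/pre-processing | lambdas/facial_detect/detect_faces.py | point_range
-- ===== SOURCE A (Python) =====
-- def point_range(points):
--     xs = [x for (x, _, _, _) in points]
--     ys = [y for (_, y, _, _) in points]
--     ws = [w for (_, _, w, _) in points]
--     hs = [h for (_, _, _, h) in points]
--
--     min_x = min(xs)
--     min_y = min(ys)
--     max_x = max(xs)
--     max_y = max(ys)
--     min_w = min(ws)
--     min_h = min(hs)
--     max_w = max(ws)
--     max_h = max(hs)
--
--     return (min_x, min_y, max_x, max_y, min_w, min_h, max_w, max_h)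
-- ===== SOURCE B (Python) =====
-- def point_range(points):
--     if not points:
--         raise ValueError("min() arg is an empty sequence")
--     (x, y, w, h) = points[0]
--     min_x, min_y, max_x, max_y = x, y, x, y
--     min_w, min_h, max_w, max_h = w, h, w, h
--     for (x, y, w, h) in points[1:]:
--         if x < min_x: min_x = x
--         if y < min_y: min_y = y
--         if x > max_x: max_x = x
--         if y > max_y: max_y = y
--         if w < min_w: min_w = w
--         if h < min_h: min_h = h
--         if w > max_w: max_w = w
--         if h > max_h: max_h = h
--     return (min_x, min_y, max_x, max_y, min_w, min_h, max_w, max_h)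
-- ===== Notes on version B (the rewrite author's own statement) =====
-- stated objective: alternative
-- what changed: Replaces four list comprehensions plus eight separate min/max scans with a single pass over points maintaining eight running extremes.
import Mathlib
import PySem

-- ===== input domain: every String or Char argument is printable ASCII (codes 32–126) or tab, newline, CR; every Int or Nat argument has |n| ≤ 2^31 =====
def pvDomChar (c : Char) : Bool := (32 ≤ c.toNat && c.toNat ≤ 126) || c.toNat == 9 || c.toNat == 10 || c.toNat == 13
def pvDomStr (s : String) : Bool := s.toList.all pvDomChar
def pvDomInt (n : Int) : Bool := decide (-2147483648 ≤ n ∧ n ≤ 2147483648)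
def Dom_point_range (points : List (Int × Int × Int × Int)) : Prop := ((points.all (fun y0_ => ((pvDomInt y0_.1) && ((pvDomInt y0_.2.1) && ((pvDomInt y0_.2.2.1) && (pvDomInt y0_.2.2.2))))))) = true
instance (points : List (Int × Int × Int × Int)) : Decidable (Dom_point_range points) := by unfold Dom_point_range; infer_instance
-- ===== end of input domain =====

-- B replaces A's four comprehensions and eight min/max scans with one pass keeping
-- eight running extremes (objective: alternative decomposition, same O(n) cost).

-- ===== PORT A =====
-- Python min(xs)/max(xs) -> PySem.List.min?/max?; none (empty list, ValueError) is excluded by Pre_.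
def point_range (points : List (Int × Int × Int × Int)) : Int × Int × Int × Int × Int × Int × Int × Int :=
  let xs := points.map (fun p => p.1)
  let ys := points.map (fun p => p.2.1)
  let ws := points.map (fun p => p.2.2.1)
  let hs := points.map (fun p => p.2.2.2)
  let min_x := (PySem.List.min? xs (fun v => v)).getD 0
  let min_y := (PySem.List.min? ys (fun v => v)).getD 0
  let max_x := (PySem.List.max? xs (fun v => v)).getD 0
  let max_y := (PySem.List.max? ys (fun v => v)).getD 0
  let min_w := (PySem.List.min? ws (fun v => v)).getD 0
  let min_h := (PySem.List.min? hs (fun v => v)).getD 0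
  let max_w := (PySem.List.max? ws (fun v => v)).getD 0
  let max_h := (PySem.List.max? hs (fun v => v)).getD 0
  (min_x, min_y, max_x, max_y, min_w, min_h, max_w, max_h)

-- ===== PORT B =====
-- the single-pass loop of Source B over the tail, carrying the eight running extremes
def prLoop (acc : Int × Int × Int × Int × Int × Int × Int × Int)
    (rest : List (Int × Int × Int × Int)) : Int × Int × Int × Int × Int × Int × Int × Int :=
  match rest with
  | [] => acc
  | (x, y, w, h) :: t =>
      let (mnx, mny, mxx, mxy, mnw, mnh, mxw, mxh) := acc
      prLoop (min mnx x, min mny y, max mxx x, max mxy y,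
              min mnw w, min mnh h, max mxw w, max mxh h) t

def point_range_alt (points : List (Int × Int × Int × Int)) : Int × Int × Int × Int × Int × Int × Int × Int :=
  match points with
  | [] => (0, 0, 0, 0, 0, 0, 0, 0)  -- Source B raises ValueError here; excluded by Pre_
  | (x, y, w, h) :: rest => prLoop (x, y, x, y, w, h, w, h) rest

-- ===== PRECONDITION & SPEC =====
-- Python A raises ValueError (min of empty sequence) on the empty list; B raises it too.
def Pre_point_range (points : List (Int × Int × Int × Int)) : Prop := points ≠ []
instance (points : List (Int × Int × Int × Int)) : Decidable (Pre_point_range points) := by unfold Pre_point_range; infer_instance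
def pvWitness_point_range : (List (Int × Int × Int × Int)) := [(1, 2, 3, 4), (-5, 0, 7, 2)]

def Spec_point_range (points : List (Int × Int × Int × Int)) (out : Int × Int × Int × Int × Int × Int × Int × Int) : Prop := out = point_range_alt points
instance (points : List (Int × Int × Int × Int)) (out : Int × Int × Int × Int × Int × Int × Int × Int) : Decidable (Spec_point_range points out) := by
  unfold Spec_point_range
  obtain ⟨a1, a2, a3, a4, a5, a6, a7, a8⟩ := out
  obtain ⟨b1, b2, b3, b4, b5, b6, b7, b8⟩ := point_range_alt points
  simp only [Prod.mk.injEq]; infer_instance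

-- ===== CLAIM (what is proved, stated in full; the proofs are below) =====
def Claim_equal_point_range : Prop := ∀ (points : List (Int × Int × Int × Int)), Dom_point_range points → Pre_point_range points → Spec_point_range points (point_range points)

-- ===== LEMMAS AND PROOFS =====

-- the B loop computes the eight componentwise foldl-min/max of the tail
theorem prLoop_eq (rest : List (Int × Int × Int × Int))
    (a b c d e f g h : Int) :
    prLoop (a, b, c, d, e, f, g, h) rest =
      ((rest.map (fun p => p.1)).foldl min a,
       (rest.map (fun p => p.2.1)).foldl min b,
       (rest.map (fun p => p.1)).foldl max c,
       (rest.map (fun p => p.2.1)).foldl max d,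
       (rest.map (fun p => p.2.2.1)).foldl min e,
       (rest.map (fun p => p.2.2.2)).foldl min f,
       (rest.map (fun p => p.2.2.1)).foldl max g,
       (rest.map (fun p => p.2.2.2)).foldl max h) := by
  induction rest generalizing a b c d e f g h with
  | nil => simp [prLoop]
  | cons p t ih =>
      obtain ⟨x, y, w, hh⟩ := p
      simp [prLoop, ih]

-- ===== VERDICT (by name: the statement is the Claim_ definition above) =====
theorem point_range_spec : Claim_equal_point_range := by
  intro points _ hpre
  unfold Spec_point_range
  match points with
  | [] => exact absurd rfl hpre
  | (x, y, w, h) :: rest =>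
      simp only [point_range, point_range_alt, List.map_cons,
        PySem.List.min?_id_cons, PySem.List.max?_id_cons, Option.getD_some, prLoop_eq]
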